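-- pv_equiv track=rewrite | github.com/Rectrix-21/KeyTone | apps/api/app/services/variations.py | _scale_step
-- ===== SOURCE A (Python) =====
-- SCALE_NOTES = {
--     "major": [0, 2, 4, 5, 7, 9, 11],
--     "minor": [0, 2, 3, 5, 7, 8, 10],
-- }
--
-- def _clamp(value: float, low: float, high: float) -> float:
--     return max(low, min(high, value))
--
-- def _in_scale(note: int, root: int, mode: str) -> bool:
--     allowed = {(root + interval) % 12 for interval in SCALE_NOTES.get(mode, SCALE_NOTES["major"])}
--     return note % 12 in allowed
--
-- def _scale_step(note: int, step: int, root: int, mode: str) -> int: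
--     direction = 1 if step >= 0 else -1
--     remaining = abs(step)
--     current = int(note)
--     while remaining > 0:
--         candidate = current + direction
--         while 0 <= candidate <= 127 and not _in_scale(candidate, root, mode):
--             candidate += direction
--         current = int(_clamp(float(candidate), 0, 127))
--         remaining -= 1
--     return current
-- ===== SOURCE B (Python) =====
-- SCALE_NOTES = {
--     "major": [0, 2, 4, 5, 7, 9, 11],
--     "minor": [0, 2, 3, 5, 7, 8, 10],
-- }
--
-- def _scale_step(note: int, step: int, root: int, mode: str) -> int:
--     # Materialise the in-range scale tones once and jump straight to the
--     # target position, saturating at the ends of the MIDI range.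
--     allowed = {(root + i) % 12 for i in SCALE_NOTES.get(mode, SCALE_NOTES["major"])}
--     scale = [n for n in range(128) if n % 12 in allowed]
--     if step == 0:
--         return note
--     if step > 0:
--         j = sum(1 for n in scale if n <= note) + step - 1
--         return scale[j] if j < len(scale) else 127
--     j = sum(1 for n in scale if n < note) + step
--     return scale[j] if j >= 0 else 0
-- ===== Notes on version B (the rewrite author's own statement) =====
-- stated objective: faster
-- what changed: B precomputes the 128-note in-scale list once and jumps straight to the target index with boundary saturation, instead of A's loop that walks semitone by semitone |step| times rebuilding the allowed pitch-class set at every probe.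
-- intended difference: For a note outside the MIDI range (note < -1 stepping up, note > 128 stepping down) A's clamp into [0,127] silently consumes one scale step and can even land on the out-of-scale pitch 0 or 127, so when that clamp target is not a scale tone (and the step count does not saturate both versions) A is off by one position, while B returns the note reached by exactly |step| scale degrees with saturation - the intended count. — e.g. on _scale_step(-2, 1, 2, "major"): A returns 0, B returns 1
import Mathlib
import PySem

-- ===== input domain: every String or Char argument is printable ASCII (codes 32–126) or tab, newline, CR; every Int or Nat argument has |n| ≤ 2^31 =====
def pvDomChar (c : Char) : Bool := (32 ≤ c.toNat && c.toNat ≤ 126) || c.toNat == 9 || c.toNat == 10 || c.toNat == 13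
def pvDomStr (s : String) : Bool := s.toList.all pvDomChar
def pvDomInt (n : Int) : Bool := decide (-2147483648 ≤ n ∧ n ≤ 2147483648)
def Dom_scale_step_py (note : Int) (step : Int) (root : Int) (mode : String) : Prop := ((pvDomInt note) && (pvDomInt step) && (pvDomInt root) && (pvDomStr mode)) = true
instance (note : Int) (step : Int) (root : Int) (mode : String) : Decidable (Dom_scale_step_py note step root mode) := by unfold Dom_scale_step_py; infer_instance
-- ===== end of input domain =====

-- B replaces A's |step| semitone-by-semitone walk by building the 128-note in-scale list
-- once and jumping to the target index with boundary saturation; on out-of-MIDI-range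
-- notes the two disagree as stated at D_scale_step_py below.

-- ===== PORT A =====
-- module constant SCALE_NOTES (shared by both Python files)
def pySCALE_NOTES : PySem.Dict String (List Int) :=
  PySem.Dict.ofList [("major", [0,2,4,5,7,9,11]), ("minor", [0,2,3,5,7,8,10])]

-- _clamp: exact on the integral values _scale_step passes through it
def clamp_py (value low high : Int) : Int := max low (min high value)

-- _in_scale
def in_scale_py (note : Int) (root : Int) (mode : String) : Bool :=
  let allowed := PySem.Set.ofList
    (((pySCALE_NOTES.get? mode).getD ((pySCALE_NOTES.get? "major").getD [])).map
      (fun interval => PySem.Int.mod (root + interval) 12))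
  PySem.Set.contains allowed (PySem.Int.mod note 12)

-- inner 'while 0 <= candidate <= 127 and not _in_scale(...)' loop; the fuel 130 strictly
-- exceeds the at most 128 iterations possible (candidate moves by dir = ±1 and the guard
-- keeps it inside [0,127]), so the loop is exact.
def innerA (root : Int) (mode : String) (dir : Int) : Nat → Int → Int
  | 0, candidate => candidate
  | fuel+1, candidate =>
    if 0 ≤ candidate ∧ candidate ≤ 127 ∧ ¬ (in_scale_py candidate root mode = true) then
      innerA root mode dir fuel (candidate + dir)
    else candidate

-- outer 'while remaining > 0' loop
def outerA (root : Int) (mode : String) (dir : Int) : Nat → Int → Int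
  | 0, current => current
  | r+1, current =>
    let candidate := innerA root mode dir 130 (current + dir)
    outerA root mode dir r (clamp_py candidate 0 127)

def scale_step_py (note : Int) (step : Int) (root : Int) (mode : String) : Int :=
  let direction : Int := if 0 ≤ step then 1 else -1
  outerA root mode direction step.natAbs note

-- ===== PORT B =====
def scale_step_py_alt (note : Int) (step : Int) (root : Int) (mode : String) : Int :=
  let allowed := PySem.Set.ofList
    (((pySCALE_NOTES.get? mode).getD ((pySCALE_NOTES.get? "major").getD [])).map
      (fun interval => PySem.Int.mod (root + interval) 12))
  let scale := (PySem.List.pyRange 0 128 1).filter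
      (fun n => PySem.Set.contains allowed (PySem.Int.mod n 12))
  if step = 0 then note
  else if 0 < step then
    let j : Int := (scale.countP (fun n => decide (n ≤ note)) : Int) + step - 1
    if j < (scale.length : Int) then (PySem.List.pyGet? scale j).getD 0 else 127
  else
    let j : Int := (scale.countP (fun n => decide (n < note)) : Int) + step
    if 0 ≤ j then (PySem.List.pyGet? scale j).getD 0 else 0

-- ===== PRECONDITION & SPEC =====
-- For a note outside the MIDI range (note < -1 stepping up, note > 128 stepping down) A's
-- clamp into [0,127] silently consumes one scale step and can even land on the out-of-scale
-- pitch 0 or 127, so when that clamp target is not a scale tone (and the step count does not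
-- saturate both versions) A is off by one position, while B returns the note reached by
-- exactly |step| scale degrees with saturation — the intended count.
-- R: the mode's pitch-class bitmask rotated to the root (bit p ⇔ MIDI pitch p is a scale tone,
-- mod 12); L: how many of the 128 MIDI notes are scale tones; b: the pitch class (0 or 7) at
-- which A's clamp lands (note 0 resp. 127)
def D_scale_step_py (note : Int) (step : Int) (root : Int) (mode : String) : Prop :=
  let R : Nat := (((if mode = "minor" then 1453 else 2741) * 4097) >>> (12 - (root % 12).toNat)) % 4096
  let L : Int := 70 + ((List.range 8).countP R.testBit : Nat)
  let b : Nat := if 0 < step then 0 else 7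
  (if 0 < step then note < -1 else step < 0 ∧ 128 < note) ∧ R.testBit b = false ∧
    (|step| ≤ L ∨ (|step| = L + 1 ∧ R.testBit (7 - b) = false))
instance (note : Int) (step : Int) (root : Int) (mode : String) : Decidable (D_scale_step_py note step root mode) := by unfold D_scale_step_py; infer_instance

def Spec_scale_step_py (note : Int) (step : Int) (root : Int) (mode : String) (out : Int) : Prop := ¬ D_scale_step_py note step root mode → out = scale_step_py_alt note step root mode
instance (note : Int) (step : Int) (root : Int) (mode : String) (out : Int) : Decidable (Spec_scale_step_py note step root mode out) := by unfold Spec_scale_step_py; infer_instance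

def pvDiffWitness_scale_step_py : Int × Int × Int × String := (-2, 1, 2, "major")
def pvDiffWitnessOut_scale_step_py : Int × Int := (0, 1)

-- ===== CLAIM (what is proved, stated in full; the proofs are below) =====
def Claim_unchanged_scale_step_py : Prop := ∀ (note : Int) (step : Int) (root : Int) (mode : String), Dom_scale_step_py note step root mode → Spec_scale_step_py note step root mode (scale_step_py note step root mode)
def Claim_changed_scale_step_py : Prop := Dom_scale_step_py (pvDiffWitness_scale_step_py.1) (pvDiffWitness_scale_step_py.2.1) (pvDiffWitness_scale_step_py.2.2.1) (pvDiffWitness_scale_step_py.2.2.2) ∧ D_scale_step_py (pvDiffWitness_scale_step_py.1) (pvDiffWitness_scale_step_py.2.1) (pvDiffWitness_scale_step_py.2.2.1) (pvDiffWitness_scale_step_py.2.2.2) ∧ scale_step_py (pvDiffWitness_scale_step_py.1) (pvDiffWitness_scale_step_py.2.1) (pvDiffWitness_scale_step_py.2.2.1) (pvDiffWitness_scale_step_py.2.2.2) = pvDiffWitnessOut_scale_step_py.1 ∧ scale_step_py_alt (pvDiffWitness_scale_step_py.1) (pvDiffWitness_scale_step_py.2.1) (pvDiffWitness_scale_step_py.2.2.1)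 (pvDiffWitness_scale_step_py.2.2.2) = pvDiffWitnessOut_scale_step_py.2 ∧ pvDiffWitnessOut_scale_step_py.1 ≠ pvDiffWitnessOut_scale_step_py.2
def Claim_exact_scale_step_py : Prop := ∀ (note : Int) (step : Int) (root : Int) (mode : String), Dom_scale_step_py note step root mode → D_scale_step_py note step root mode → scale_step_py note step root mode ≠ scale_step_py_alt note step root mode

-- ===== LEMMAS AND PROOFS =====

-- D_'s bitmask membership and scale-size, as named proof-side functions
def dMask (mode : String) : Nat := if mode = "minor" then 1453 else 2741

def dHasPC (root : Int) (p : Int) (mode : String) : Bool :=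
  (dMask mode).testBit ((p - root) % 12).toNat

def dLen (root : Int) (mode : String) : Nat :=
  ((List.range 128).filter (fun n : Nat => dHasPC root (n : Int) mode)).length

lemma dLen_70 (root : Int) (mode : String) :
    dLen root mode = 70 + ((List.range 8).countP fun p : Nat => dHasPC root (p : Int) mode) := by
  have key : ∀ p : Int, dHasPC root p mode =
      (dMask mode).testBit ((p - root % 12) % 12).toNat := by
    intro p
    unfold dHasPC
    congr 1
    omega
  have h1 : 0 ≤ root % 12 := Int.emod_nonneg _ (by norm_num)
  have h2 : root % 12 < 12 := Int.emod_lt_of_pos _ (by norm_num)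
  unfold dLen
  simp only [key]
  set r := root % 12 with hr
  clear_value r
  unfold dMask
  interval_cases r <;> by_cases hm : mode = "minor" <;> simp only [hm, if_true, if_false,
    reduceIte] <;> decide

lemma rot_bit (root : Int) (mode : String) (b : Nat) (hb : b < 12) :
    ((((if mode = "minor" then 1453 else 2741) * 4097) >>>
        (12 - (root % 12).toNat)) % 4096).testBit b = dHasPC root (b : Int) mode := by
  have h1 : 0 ≤ root % 12 := Int.emod_nonneg _ (by norm_num)
  have h2 : root % 12 < 12 := Int.emod_lt_of_pos _ (by norm_num)
  unfold dHasPC dMask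
  have hmod : (((b : Int) - root) % 12).toNat = (b + 12 - (root % 12).toNat) % 12 := by omega
  rw [hmod]
  set r := (root % 12).toNat with hr
  have hrb : r < 12 := by omega
  clear_value r
  by_cases hm : mode = "minor" <;>
    simp only [hm, reduceIte, if_true, if_false] <;>
    interval_cases r <;> interval_cases b <;> decide

lemma dHasPC_127 (root : Int) (mode : String) :
    dHasPC root 127 mode = dHasPC root 7 mode := by
  unfold dHasPC
  congr 1
  omega

lemma D_eq (note step root : Int) (mode : String) :
    D_scale_step_py note step root mode ↔
      ((0 < step ∧ note < -1 ∧ dHasPC root 0 mode = false ∧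
        (step ≤ (dLen root mode : Int) ∨
          (step = (dLen root mode : Int) + 1 ∧ dHasPC root 127 mode = false))) ∨
       (step < 0 ∧ 128 < note ∧ dHasPC root 127 mode = false ∧
        (-step ≤ (dLen root mode : Int) ∨
          (-step = (dLen root mode : Int) + 1 ∧ dHasPC root 0 mode = false)))) := by
  have hbit : ∀ b : Nat, b < 12 →
      ((((if mode = "minor" then 1453 else 2741) * 4097) >>>
          (12 - (root % 12).toNat)) % 4096).testBit b = dHasPC root (b : Int) mode :=
    fun b hb => rot_bit root mode b hb
  have hcount : (List.range 8).countP
        ((((if mode = "minor" then 1453 else 2741) * 4097) >>>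
          (12 - (root % 12).toNat)) % 4096).testBit =
      (List.range 8).countP (fun p : Nat => dHasPC root (p : Int) mode) := by
    apply List.countP_congr
    intro b hb
    have hb12 : b < 12 := by have := List.mem_range.mp hb; omega
    rw [hbit b hb12]
  have hc : (70 : Int) + (((List.range 8).countP
        ((((if mode = "minor" then 1453 else 2741) * 4097) >>>
          (12 - (root % 12).toNat)) % 4096).testBit : Nat) : Int) =
      ((dLen root mode : Nat) : Int) := by
    rw [hcount, dLen_70]
    push_cast
    ring
  unfold D_scale_step_py
  by_cases hstep : 0 < step
  · simp only [if_pos hstep, abs_of_pos hstep, Nat.sub_zero, hbit 0 (by norm_num),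
      hbit 7 (by norm_num), hc, dHasPC_127]
    constructor
    · rintro ⟨hn, hb0, hrest⟩
      exact Or.inl ⟨hstep, hn, hb0, hrest⟩
    · rintro (⟨_, hn, hb0, hrest⟩ | ⟨hneg, _, _, _⟩)
      · exact ⟨hn, hb0, hrest⟩
      · omega
  · simp only [if_neg hstep, Nat.sub_self, hbit 0 (by norm_num), hbit 7 (by norm_num),
      hc, dHasPC_127]
    constructor
    · rintro ⟨⟨hneg, hn⟩, hb7, hrest⟩
      rw [abs_of_neg hneg] at hrest
      exact Or.inr ⟨hneg, hn, hb7, hrest⟩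
    · rintro (⟨hpos, _, _, _⟩ | ⟨hneg, hn, hb7, hrest⟩)
      · omega
      · exact ⟨⟨hneg, hn⟩, hb7, by rw [abs_of_neg hneg]; exact hrest⟩

-- the in-range, in-scale note list both formulas are about
def sList (root : Int) (mode : String) : List Int :=
  (PySem.List.pyRange 0 128 1).filter (fun n => in_scale_py n root mode)

-- proof-side list of intervals (used only below the claim block)
def dIntervals (mode : String) : List Int :=
  if mode = "minor" then [0,2,3,5,7,8,10] else [0,2,4,5,7,9,11]

lemma hasPC_iff (root p : Int) (mode : String) :
    dHasPC root p mode = true ↔ (p - root) % 12 ∈ dIntervals mode := by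
  unfold dHasPC dIntervals dMask
  have h1 : 0 ≤ (p - root) % 12 := Int.emod_nonneg _ (by norm_num)
  have h2 : (p - root) % 12 < 12 := Int.emod_lt_of_pos _ (by norm_num)
  set r := (p - root) % 12 with hr
  clear_value r
  split_ifs <;> interval_cases r <;> decide

lemma dIntervals_bounds (mode : String) : ∀ i ∈ dIntervals mode, 0 ≤ i ∧ i < 12 := by
  unfold dIntervals
  split_ifs <;> decide

lemma in_scale_eq (n root : Int) (mode : String) :
    in_scale_py n root mode = dHasPC root n mode := by
  rw [Bool.eq_iff_iff, hasPC_iff]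
  unfold in_scale_py
  rw [PySem.Set.contains_iff, PySem.Set.mem_ofList]
  have hI : ((pySCALE_NOTES.get? mode).getD ((pySCALE_NOTES.get? "major").getD [])) =
      dIntervals mode := by
    by_cases h : mode = "minor"
    · subst h; rfl
    · by_cases h2 : mode = "major"
      · subst h2; rfl
      · unfold dIntervals
        rw [if_neg h]
        have : pySCALE_NOTES.get? mode = none := by
          show (PySem.Dict.mk [("major", ([0,2,4,5,7,9,11] : List Int)), ("minor", [0,2,3,5,7,8,10])]).get? mode = none
          rw [PySem.Dict.get?_mk_cons, PySem.Dict.get?_mk_cons]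
          have hb1 : ("major" == mode) = false := by
            simp [show ¬ ("major" = mode) from fun hh => h2 hh.symm]
          have hb2 : ("minor" == mode) = false := by
            simp [show ¬ ("minor" = mode) from fun hh => h hh.symm]
          simp [hb1, hb2, PySem.Dict.get?]
        rw [this]
        rfl
  rw [hI]
  constructor
  · intro hx
    rcases List.mem_map.mp hx with ⟨i, hi, hie⟩
    obtain ⟨hb1, hb2⟩ := dIntervals_bounds mode i hi
    rw [PySem.Int.mod_eq_emod_of_pos (by norm_num),
      PySem.Int.mod_eq_emod_of_pos (by norm_num)] at hie
    have : (n - root) % 12 = i := by omega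
    rw [this]
    exact hi
  · intro hmem
    refine List.mem_map.mpr ⟨(n - root) % 12, hmem, ?_⟩
    rw [PySem.Int.mod_eq_emod_of_pos (by norm_num),
      PySem.Int.mod_eq_emod_of_pos (by norm_num)]
    omega

lemma dLen_eq (root : Int) (mode : String) : dLen root mode = (sList root mode).length := by
  unfold dLen sList
  have h : PySem.List.pyRange 0 128 1 = (List.range 128).map (fun n : Nat => (n : Int)) := by
    rw [show (128 : Int) = ((128 : Nat) : Int) by norm_num]
    exact PySem.List.pyRange_zero_natCast 128
  rw [h, List.filter_map, List.length_map]
  congr 1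
  apply List.filter_congr
  intro n _
  simp only [Function.comp]
  exact (in_scale_eq (n : Int) root mode).symm

lemma mem_sList {root : Int} {mode : String} {n : Int} :
    n ∈ sList root mode ↔ (0 ≤ n ∧ n < 128 ∧ in_scale_py n root mode = true) := by
  simp [sList, List.mem_filter, PySem.List.mem_pyRange_one]
  tauto

lemma pairwise_sList (root : Int) (mode : String) : (sList root mode).Pairwise (· < ·) :=
  (PySem.List.pairwise_lt_pyRange_one 0 128).filter _

lemma zero_mem_dIntervals (mode : String) : (0 : Int) ∈ dIntervals mode := by
  unfold dIntervals
  split_ifs <;> simp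

lemma sList_ne_nil (root : Int) (mode : String) : 0 < (sList root mode).length := by
  have hr0 : 0 ≤ PySem.Int.mod root 12 ∧ PySem.Int.mod root 12 < 12 := by
    rw [PySem.Int.mod_eq_emod_of_pos (by norm_num)]
    exact ⟨Int.emod_nonneg root (by norm_num), Int.emod_lt_of_pos root (by norm_num)⟩
  have hmem : PySem.Int.mod root 12 ∈ sList root mode := by
    rw [mem_sList]
    refine ⟨hr0.1, by omega, ?_⟩
    rw [in_scale_eq, hasPC_iff]
    have : (PySem.Int.mod root 12 - root) % 12 = 0 := by
      rw [PySem.Int.mod_eq_emod_of_pos (b := 12) (by norm_num)]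
      omega
    rw [this]
    exact zero_mem_dIntervals mode
  exact List.length_pos_of_mem hmem

-- generic facts about strictly increasing Int lists
lemma count_lt_getElem (l : List Int) (hl : l.Pairwise (· < ·)) :
    ∀ j (h : j < l.length) (m : Int), l[j] = m → l.countP (fun n => decide (n < m)) = j := by
  induction l with
  | nil => intro j h; simp at h
  | cons x t ih =>
    intro j h m hm
    rcases List.pairwise_cons.mp hl with ⟨hx, ht⟩
    cases j with
    | zero =>
      simp only [List.getElem_cons_zero] at hm
      subst hm
      rw [List.countP_eq_zero]
      intro a ha
      simp only [decide_eq_true_eq]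
      rcases List.mem_cons.mp ha with rfl | ha'
      · omega
      · exact not_lt.mpr (le_of_lt (hx a ha'))
    | succ j =>
      simp only [List.getElem_cons_succ] at hm
      have h2 : j < t.length := by simpa using h
      have hxm : x < m := hm ▸ hx _ (List.getElem_mem h2)
      rw [List.countP_cons, ih ht j h2 m hm]
      simp [hxm]

lemma count_le_getElem (l : List Int) (hl : l.Pairwise (· < ·)) :
    ∀ j (h : j < l.length) (m : Int), l[j] = m → l.countP (fun n => decide (n ≤ m)) = j + 1 := by
  induction l with
  | nil => intro j h; simp at h
  | cons x t ih =>
    intro j h m hm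
    rcases List.pairwise_cons.mp hl with ⟨hx, ht⟩
    cases j with
    | zero =>
      simp only [List.getElem_cons_zero] at hm
      subst hm
      rw [List.countP_cons]
      have h1 : t.countP (fun n => decide (n ≤ x)) = 0 := by
        rw [List.countP_eq_zero]
        intro a ha
        simp only [decide_eq_true_eq]
        exact not_le.mpr (hx a ha)
      rw [h1]
      simp
    | succ j =>
      simp only [List.getElem_cons_succ] at hm
      have h2 : j < t.length := by simpa using h
      have hxm : x ≤ m := le_of_lt (hm ▸ hx _ (List.getElem_mem h2))
      rw [List.countP_cons, ih ht j h2 m hm]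
      simp [hxm]

lemma count_lt_of_mem {l : List Int} (hl : l.Pairwise (· < ·)) {m : Int} (hm : m ∈ l) :
    l.countP (fun n => decide (n < m)) < l.length ∧
      l.getD (l.countP (fun n => decide (n < m))) 0 = m ∧
      l.countP (fun n => decide (n ≤ m)) = l.countP (fun n => decide (n < m)) + 1 := by
  rcases List.mem_iff_getElem.mp hm with ⟨j, hj, hjm⟩
  refine ⟨?_, ?_, ?_⟩
  · rw [count_lt_getElem l hl j hj m hjm]; exact hj
  · rw [count_lt_getElem l hl j hj m hjm, List.getD_eq_getElem l 0 hj, hjm]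
  · rw [count_lt_getElem l hl j hj m hjm, count_le_getElem l hl j hj m hjm]

lemma getD_strict {l : List Int} (hl : l.Pairwise (· < ·)) {i j : Nat}
    (hij : i < j) (hj : j < l.length) : l.getD i 0 < l.getD j 0 := by
  rw [List.getD_eq_getElem l 0 (by omega), List.getD_eq_getElem l 0 hj]
  exact List.pairwise_iff_getElem.mp hl i j (by omega) hj hij

-- every scale note is ≤ c once c ≥ 127
lemma count_le_all (root : Int) (mode : String) {c : Int} (hc : 127 ≤ c) :
    (sList root mode).countP (fun n => decide (n ≤ c)) = (sList root mode).length := by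
  rw [List.countP_eq_length]
  intro a ha
  have := mem_sList.mp ha
  simp only [decide_eq_true_eq]
  omega

lemma count_lt_all (root : Int) (mode : String) {c : Int} (hc : 128 ≤ c) :
    (sList root mode).countP (fun n => decide (n < c)) = (sList root mode).length := by
  rw [List.countP_eq_length]
  intro a ha
  have := mem_sList.mp ha
  simp only [decide_eq_true_eq]
  omega

lemma count_lt_none (root : Int) (mode : String) {c : Int} (hc : c ≤ 0) :
    (sList root mode).countP (fun n => decide (n < c)) = 0 := by
  rw [List.countP_eq_zero]
  intro a ha
  have := mem_sList.mp ha
  simp only [decide_eq_true_eq]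
  omega

lemma count_le_none (root : Int) (mode : String) {c : Int} (hc : c < 0) :
    (sList root mode).countP (fun n => decide (n ≤ c)) = 0 := by
  rw [List.countP_eq_zero]
  intro a ha
  have := mem_sList.mp ha
  simp only [decide_eq_true_eq]
  omega

-- membership of 0 and 127 in the scale list, phrased through dInScale
lemma zero_mem_sList_iff (root : Int) (mode : String) :
    (0 : Int) ∈ sList root mode ↔ dHasPC root 0 mode = true := by
  rw [mem_sList, ← in_scale_eq]
  constructor
  · exact fun h => h.2.2
  · exact fun h => ⟨le_refl 0, by norm_num, h⟩

lemma last_mem_sList_iff (root : Int) (mode : String) :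
    (127 : Int) ∈ sList root mode ↔ dHasPC root 127 mode = true := by
  rw [mem_sList, ← in_scale_eq]
  constructor
  · exact fun h => h.2.2
  · exact fun h => ⟨by norm_num, by norm_num, h⟩

-- counts and positions of 0 (bottom) and 127 (top) when they are scale tones
lemma zero_facts {root : Int} {mode : String} (h : (0 : Int) ∈ sList root mode) :
    (sList root mode).countP (fun n => decide (n ≤ 0)) = 1 ∧
      (sList root mode).getD 0 0 = 0 := by
  obtain ⟨hlt, hget, hsucc⟩ := count_lt_of_mem (pairwise_sList root mode) h
  have h0 : (sList root mode).countP (fun n => decide (n < 0)) = 0 :=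
    count_lt_none root mode (le_refl 0)
  refine ⟨by rw [hsucc, h0], ?_⟩
  rw [h0] at hget
  exact hget

lemma last_facts {root : Int} {mode : String} (h : (127 : Int) ∈ sList root mode) :
    (sList root mode).countP (fun n => decide (n < 127)) = (sList root mode).length - 1 ∧
      (sList root mode).getD ((sList root mode).length - 1) 0 = 127 := by
  obtain ⟨hlt, hget, hsucc⟩ := count_lt_of_mem (pairwise_sList root mode) h
  have hall : (sList root mode).countP (fun n => decide (n ≤ 127)) = (sList root mode).length :=
    count_le_all root mode (le_refl 127)
  have hcnt : (sList root mode).countP (fun n => decide (n < 127)) =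
      (sList root mode).length - 1 := by omega
  exact ⟨hcnt, by rw [← hcnt]; exact hget⟩

-- count over < c and ≤ c agree when c itself is not a scale tone
lemma count_lt_eq_le_of_not_mem {root : Int} {mode : String} {c : Int}
    (h : c ∉ sList root mode) :
    (sList root mode).countP (fun n => decide (n < c)) =
      (sList root mode).countP (fun n => decide (n ≤ c)) := by
  apply List.countP_congr
  intro a ha
  have hne : a ≠ c := fun hh => h (hh ▸ ha)
  simp only [decide_eq_true_eq]
  omega

-- first in-scale note at or above c (proof-side characterisation of A's inner loop, dir = 1)
def upF (root : Int) (mode : String) (c : Int) : Int :=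
  if 127 < c then c
  else if in_scale_py c root mode then c
  else upF root mode (c + 1)
termination_by (128 - c).toNat
decreasing_by omega

-- first in-scale note at or below c (dir = -1)
def downF (root : Int) (mode : String) (c : Int) : Int :=
  if c < 0 then c
  else if in_scale_py c root mode then c
  else downF root mode (c - 1)
termination_by (c + 1).toNat
decreasing_by omega

lemma innerA_up (root : Int) (mode : String) :
    ∀ (fuel : Nat) (c : Int), 0 ≤ c → (128 - c).toNat < fuel →
      innerA root mode 1 fuel c = upF root mode c := by
  intro fuel
  induction fuel with
  | zero => intro c hc hf; omega
  | succ f ih =>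
    intro c hc hf
    rw [innerA, upF]
    by_cases h127 : 127 < c
    · have : ¬ (0 ≤ c ∧ c ≤ 127 ∧ ¬ (in_scale_py c root mode = true)) := by
        intro ⟨_, h, _⟩; omega
      simp [this, h127]
    · by_cases hp : in_scale_py c root mode = true
      · have : ¬ (0 ≤ c ∧ c ≤ 127 ∧ ¬ (in_scale_py c root mode = true)) := by
          intro ⟨_, _, h⟩; exact h hp
        simp [this, h127, hp]
      · have hcond : (0 ≤ c ∧ c ≤ 127 ∧ ¬ (in_scale_py c root mode = true)) :=
          ⟨hc, by omega, hp⟩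
        simp only [hcond, if_true, h127, if_false, hp]
        exact ih (c + 1) (by omega) (by omega)

lemma innerA_down (root : Int) (mode : String) :
    ∀ (fuel : Nat) (c : Int), c ≤ 127 → (c + 1).toNat < fuel →
      innerA root mode (-1) fuel c = downF root mode c := by
  intro fuel
  induction fuel with
  | zero => intro c hc hf; omega
  | succ f ih =>
    intro c hc hf
    rw [innerA, downF]
    by_cases hneg : c < 0
    · have : ¬ (0 ≤ c ∧ c ≤ 127 ∧ ¬ (in_scale_py c root mode = true)) := by
        intro ⟨h, _, _⟩; omega
      simp [this, hneg]
    · by_cases hp : in_scale_py c root mode = true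
      · have : ¬ (0 ≤ c ∧ c ≤ 127 ∧ ¬ (in_scale_py c root mode = true)) := by
          intro ⟨_, _, h⟩; exact h hp
        simp [this, hneg, hp]
      · have hcond : (0 ≤ c ∧ c ≤ 127 ∧ ¬ (in_scale_py c root mode = true)) :=
          ⟨by omega, hc, hp⟩
        simp only [hcond, if_true, hneg, if_false, hp]
        have : c + -1 = c - 1 := by ring
        rw [this]
        exact ih (c - 1) (by omega) (by omega)

-- one upward A-iteration, after clamping, lands on the i-th scale note (i = #{n ∈ S | n ≤ c})
-- or saturates at 127
lemma bridge_up (root : Int) (mode : String) :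
    ∀ (N : Nat) (c : Int), -1 ≤ c → (127 - c).toNat ≤ N →
      clamp_py (upF root mode (c + 1)) 0 127 =
        (if (sList root mode).countP (fun n => decide (n ≤ c)) < (sList root mode).length
         then (sList root mode).getD ((sList root mode).countP (fun n => decide (n ≤ c))) 0
         else 127) := by
  intro N
  induction N with
  | zero =>
    intro c hc hN
    have h127 : 127 ≤ c := by omega
    rw [upF]
    have hgt : 127 < c + 1 := by omega
    rw [if_pos hgt]
    rw [count_le_all root mode h127, if_neg (lt_irrefl _)]
    simp only [clamp_py]
    omega
  | succ N ih =>
    intro c hc hN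
    by_cases h127 : 127 ≤ c
    · rw [upF]
      have hgt : 127 < c + 1 := by omega
      rw [if_pos hgt]
      rw [count_le_all root mode h127, if_neg (lt_irrefl _)]
      simp only [clamp_py]
      omega
    · rw [upF]
      have hgt : ¬ (127 < c + 1) := by omega
      rw [if_neg hgt]
      by_cases hp : in_scale_py (c + 1) root mode = true
      · rw [if_pos hp]
        have hmem : (c + 1) ∈ sList root mode := mem_sList.mpr ⟨by omega, by omega, hp⟩
        obtain ⟨hlt, hget, _⟩ := count_lt_of_mem (pairwise_sList root mode) hmem
        have hcnt : (sList root mode).countP (fun n => decide (n ≤ c)) =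
            (sList root mode).countP (fun n => decide (n < c + 1)) := by
          apply List.countP_congr
          intro a _
          simp only [decide_eq_true_eq]
          omega
        rw [hcnt, if_pos hlt, hget]
        simp only [clamp_py]
        omega
      · rw [if_neg hp]
        have hcnt : (sList root mode).countP (fun n => decide (n ≤ c + 1)) =
            (sList root mode).countP (fun n => decide (n ≤ c)) := by
          apply List.countP_congr
          intro a ha
          have hne : a ≠ c + 1 := by
            intro h; subst h
            exact hp (mem_sList.mp ha).2.2
          simp only [decide_eq_true_eq]
          omega
        have := ih (c + 1) (by omega) (by omega)
        rw [show c + 1 + 1 = c + 2 by ring] at this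
        rw [show c + 1 + 1 = c + 2 by ring, this, hcnt]

-- one downward A-iteration: previous scale note, or saturation at 0
lemma bridge_down (root : Int) (mode : String) :
    ∀ (N : Nat) (c : Int), c ≤ 128 → (c + 1).toNat ≤ N →
      clamp_py (downF root mode (c - 1)) 0 127 =
        (if 0 < (sList root mode).countP (fun n => decide (n < c))
         then (sList root mode).getD ((sList root mode).countP (fun n => decide (n < c)) - 1) 0
         else 0) := by
  intro N
  induction N with
  | zero =>
    intro c hc hN
    have h0 : c ≤ 0 := by omega
    rw [downF]
    have hneg : c - 1 < 0 := by omega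
    rw [if_pos hneg]
    rw [count_lt_none root mode h0]
    simp only [clamp_py]
    omega
  | succ N ih =>
    intro c hc hN
    by_cases h0 : c ≤ 0
    · rw [downF]
      have hneg : c - 1 < 0 := by omega
      rw [if_pos hneg]
      rw [count_lt_none root mode h0]
      simp only [clamp_py]
      omega
    · rw [downF]
      have hneg : ¬ (c - 1 < 0) := by omega
      rw [if_neg hneg]
      by_cases hp : in_scale_py (c - 1) root mode = true
      · rw [if_pos hp]
        have hmem : (c - 1) ∈ sList root mode := mem_sList.mpr ⟨by omega, by omega, hp⟩
        obtain ⟨hlt, hget, hsucc⟩ := count_lt_of_mem (pairwise_sList root mode) hmem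
        have hcnt : (sList root mode).countP (fun n => decide (n < c)) =
            (sList root mode).countP (fun n => decide (n ≤ c - 1)) := by
          apply List.countP_congr
          intro a _
          simp only [decide_eq_true_eq]
          omega
        rw [hcnt, hsucc, if_pos (Nat.succ_pos _), Nat.add_sub_cancel, hget]
        simp only [clamp_py]
        omega
      · rw [if_neg hp]
        have hcnt : (sList root mode).countP (fun n => decide (n < c - 1)) =
            (sList root mode).countP (fun n => decide (n < c)) := by
          apply List.countP_congr
          intro a ha
          have hne : a ≠ c - 1 := by
            intro h; subst h
            exact hp (mem_sList.mp ha).2.2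
          simp only [decide_eq_true_eq]
          omega
        have := ih (c - 1) (by omega) (by omega)
        rw [show c - 1 - 1 = c - 2 by ring] at this
        rw [show c - 1 - 1 = c - 2 by ring, this, hcnt]

lemma getD_mem_sList {root : Int} {mode : String} {i : Nat}
    (h : i < (sList root mode).length) :
    (sList root mode).getD i 0 ∈ sList root mode := by
  rw [List.getD_eq_getElem _ _ h]
  exact List.getElem_mem h

-- A's upward loop in closed form: jump by k positions in the scale list, saturate at 127
lemma outer_up (root : Int) (mode : String) :
    ∀ (k : Nat) (c : Int), -1 ≤ c →
      outerA root mode 1 k c =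
        (if k = 0 then c
         else if (sList root mode).countP (fun n => decide (n ≤ c)) + k ≤ (sList root mode).length
           then (sList root mode).getD ((sList root mode).countP (fun n => decide (n ≤ c)) + k - 1) 0
           else 127) := by
  intro k
  induction k with
  | zero => intro c hc; simp [outerA]
  | succ k ih =>
    intro c hc
    rw [outerA]
    have hin : innerA root mode 1 130 (c + 1) = upF root mode (c + 1) :=
      innerA_up root mode 130 (c + 1) (by omega) (by omega)
    simp only [hin]
    rw [bridge_up root mode (127 - c).toNat c hc (le_refl _)]
    by_cases hlt : (sList root mode).countP (fun n => decide (n ≤ c)) < (sList root mode).length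
    · rw [if_pos hlt]
      set S := sList root mode with hS
      set i := S.countP (fun n => decide (n ≤ c)) with hi
      have hgetD : S.getD i 0 = S[i] := List.getD_eq_getElem _ _ hlt
      have hbnd := mem_sList.mp (getD_mem_sList (root := root) (mode := mode) hlt)
      rw [← hS] at hbnd
      rw [ih (S.getD i 0) (by omega)]
      have hcnt : S.countP (fun n => decide (n ≤ S.getD i 0)) = i + 1 := by
        rw [hgetD]; exact count_le_getElem S (pairwise_sList root mode) i hlt _ rfl
      rw [hcnt]
      rw [if_neg (Nat.succ_ne_zero k)]
      by_cases hk : k = 0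
      · subst hk
        rw [if_pos rfl, if_pos (by omega), Nat.add_sub_cancel]
      · rw [if_neg hk,
          show i + 1 + k - 1 = i + (k + 1) - 1 from by omega]
        split_ifs with h1 h2 h2 <;> first | rfl | omega
    · rw [if_neg hlt]
      have hle : (sList root mode).countP (fun n => decide (n ≤ c)) ≤ (sList root mode).length :=
        List.countP_le_length
      rw [ih 127 (by norm_num), count_le_all root mode (le_refl 127)]
      rw [if_neg (Nat.succ_ne_zero k),
        if_neg (show ¬((sList root mode).countP (fun n => decide (n ≤ c)) + (k + 1) ≤ (sList root mode).length) by omega)]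
      by_cases hk : k = 0
      · subst hk; rw [if_pos rfl]
      · rw [if_neg hk,
          if_neg (show ¬((sList root mode).length + k ≤ (sList root mode).length) by omega)]

-- A's downward loop in closed form: jump back by k positions, saturate at 0
lemma outer_down (root : Int) (mode : String) :
    ∀ (k : Nat) (c : Int), c ≤ 128 →
      outerA root mode (-1) k c =
        (if k = 0 then c
         else if k ≤ (sList root mode).countP (fun n => decide (n < c))
           then (sList root mode).getD ((sList root mode).countP (fun n => decide (n < c)) - k) 0
           else 0) := by
  intro k
  induction k with
  | zero => intro c hc; simp [outerA]
  | succ k ih =>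
    intro c hc
    rw [outerA]
    have hin : innerA root mode (-1) 130 (c + -1) = downF root mode (c - 1) := by
      rw [show c + -1 = c - 1 from by ring]
      exact innerA_down root mode 130 (c - 1) (by omega) (by omega)
    simp only [hin]
    rw [bridge_down root mode (c + 1).toNat c hc (le_refl _)]
    by_cases hpos : 0 < (sList root mode).countP (fun n => decide (n < c))
    · rw [if_pos hpos]
      set S := sList root mode with hS
      set i := S.countP (fun n => decide (n < c)) with hi
      have hile : i ≤ S.length := List.countP_le_length
      have hlt : i - 1 < S.length := by omega
      have hgetD : S.getD (i - 1) 0 = S[i - 1] := List.getD_eq_getElem _ _ hlt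
      have hbnd := mem_sList.mp (getD_mem_sList (root := root) (mode := mode) hlt)
      rw [← hS] at hbnd
      rw [ih (S.getD (i - 1) 0) (by omega)]
      have hcnt : S.countP (fun n => decide (n < S.getD (i - 1) 0)) = i - 1 := by
        rw [hgetD]; exact count_lt_getElem S (pairwise_sList root mode) (i - 1) hlt _ rfl
      rw [hcnt]
      rw [if_neg (Nat.succ_ne_zero k)]
      by_cases hk : k = 0
      · subst hk
        rw [if_pos rfl, if_pos (by omega)]
      · rw [if_neg hk,
          show i - 1 - k = i - (k + 1) from by omega]
        split_ifs with h1 h2 h2 <;> first | rfl | omega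
    · rw [if_neg hpos]
      have h0 : (sList root mode).countP (fun n => decide (n < c)) = 0 := by omega
      rw [ih 0 (by norm_num), count_lt_none root mode (le_refl 0), h0]
      rw [if_neg (Nat.succ_ne_zero k), if_neg (show ¬(k + 1 ≤ 0) by omega)]
      by_cases hk : k = 0
      · subst hk; rw [if_pos rfl]
      · rw [if_neg hk, if_neg (show ¬(k ≤ 0) by omega)]

-- B's port, re-expressed over sList (the filter predicates are definitionally equal)
lemma alt_eq (note step root : Int) (mode : String) :
    scale_step_py_alt note step root mode =
      (let scale := sList root mode
       if step = 0 then note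
       else if 0 < step then
         let j : Int := (scale.countP (fun n => decide (n ≤ note)) : Int) + step - 1
         if j < (scale.length : Int) then (PySem.List.pyGet? scale j).getD 0 else 127
       else
         let j : Int := (scale.countP (fun n => decide (n < note)) : Int) + step
         if 0 ≤ j then (PySem.List.pyGet? scale j).getD 0 else 0) := rfl

-- turn B's guarded Int indexing into List.getD
lemma pyGet_getD (l : List Int) (j : Int) (hj : 0 ≤ j) :
    (PySem.List.pyGet? l j).getD 0 = l.getD j.toNat 0 := by
  rw [PySem.List.pyGet?_of_nonneg l hj, ← List.getD_eq_getElem?_getD]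

-- the upward tail formulas agree (Nat closed form vs B's Int-indexed one)
lemma up_tail (S : List Int) (i k : Nat) (c : Int) (hk : 1 ≤ k) :
    (if k = 0 then c
     else if i + k ≤ S.length then S.getD (i + k - 1) 0 else 127) =
    (if (i : Int) + (k : Int) - 1 < (S.length : Int)
       then (PySem.List.pyGet? S ((i : Int) + (k : Int) - 1)).getD 0 else 127) := by
  rw [if_neg (show ¬ k = 0 by omega)]
  by_cases hge : i + k ≤ S.length
  · rw [if_pos hge, if_pos (show (i : Int) + (k : Int) - 1 < (S.length : Int) by push_cast; omega)]
    rw [pyGet_getD S _ (show (0:Int) ≤ (i : Int) + (k : Int) - 1 by push_cast; omega)]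
    congr 1
    omega
  · rw [if_neg hge, if_neg (show ¬((i : Int) + (k : Int) - 1 < (S.length : Int)) by push_cast; omega)]

-- the downward tail formulas agree
lemma down_tail (S : List Int) (i k : Nat) (c : Int) (hk : 1 ≤ k) :
    (if k = 0 then c
     else if k ≤ i then S.getD (i - k) 0 else 0) =
    (if (0 : Int) ≤ (i : Int) - (k : Int)
       then (PySem.List.pyGet? S ((i : Int) - (k : Int))).getD 0 else 0) := by
  rw [if_neg (show ¬ k = 0 by omega)]
  by_cases hge : k ≤ i
  · rw [if_pos hge, if_pos (show (0 : Int) ≤ (i : Int) - (k : Int) by push_cast; omega)]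
    rw [pyGet_getD S _ (show (0:Int) ≤ (i : Int) - (k : Int) by push_cast; omega)]
    congr 1
    omega
  · rw [if_neg hge, if_neg (show ¬((0 : Int) ≤ (i : Int) - (k : Int)) by push_cast; omega)]

-- ===== VERDICT (by name: the statement is the Claim_ definition above) =====
-- both ports reduced to closed forms over sList; shared case analysis helpers

-- A with note < -1 and k+1 upward steps: the first iteration clamps to 0
lemma A_up_low (root : Int) (mode : String) (note : Int) (k : Nat) (h : note < -1) :
    outerA root mode 1 (k + 1) note =
      (if k = 0 then 0
       else if (sList root mode).countP (fun n => decide (n ≤ 0)) + k ≤ (sList root mode).length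
         then (sList root mode).getD ((sList root mode).countP (fun n => decide (n ≤ 0)) + k - 1) 0
         else 127) := by
  rw [outerA]
  have hinner : innerA root mode 1 130 (note + 1) = note + 1 := by
    rw [innerA, if_neg (by intro ⟨hh, _, _⟩; omega)]
  rw [hinner]
  have hclamp : clamp_py (note + 1) 0 127 = 0 := by
    simp only [clamp_py]; omega
  rw [hclamp]
  exact outer_up root mode k 0 (by norm_num)

-- A with note > 128 and k+1 downward steps: the first iteration clamps to 127
lemma A_down_high (root : Int) (mode : String) (note : Int) (k : Nat) (h : 128 < note) :
    outerA root mode (-1) (k + 1) note =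
      (if k = 0 then 127
       else if k ≤ (sList root mode).countP (fun n => decide (n < 127))
         then (sList root mode).getD ((sList root mode).countP (fun n => decide (n < 127)) - k) 0
         else 0) := by
  rw [outerA]
  have hinner : innerA root mode (-1) 130 (note + -1) = note + -1 := by
    rw [innerA, if_neg (by intro ⟨_, hh, _⟩; omega)]
  rw [hinner]
  have hclamp : clamp_py (note + -1) 0 127 = 127 := by
    simp only [clamp_py]; omega
  rw [hclamp]
  exact outer_down root mode k 127 (by norm_num)

theorem scale_step_py_spec : Claim_unchanged_scale_step_py := by
  unfold Claim_unchanged_scale_step_py Spec_scale_step_py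
  intro note step root mode _ hnD
  rw [alt_eq]
  simp only []
  unfold scale_step_py
  rcases lt_trichotomy step 0 with hstep | hstep | hstep
  · -- step < 0 : downward
    rw [if_neg (show ¬ (0 : Int) ≤ step by omega),
      if_neg (show ¬ step = 0 by omega), if_neg (show ¬ (0 : Int) < step by omega)]
    have hk1 : 1 ≤ step.natAbs := by omega
    have hks : step = -((step.natAbs : Nat) : Int) := by omega
    by_cases h128 : 128 < note
    · -- out-of-range start: first A-iteration clamps to 127
      have hLpos := sList_ne_nil root mode
      obtain ⟨k', hk'⟩ : ∃ k', step.natAbs = k' + 1 := ⟨step.natAbs - 1, by omega⟩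
      rw [hk', A_down_high root mode note k' h128]
      have hcntnote : (sList root mode).countP (fun n => decide (n < note)) =
          (sList root mode).length := count_lt_all root mode (by omega)
      rw [hcntnote]
      set S := sList root mode with hS
      set L := S.length with hL
      by_cases h127 : dHasPC root 127 mode = true
      · -- 127 is a scale tone: it is the top element, both agree
        have hmem : (127 : Int) ∈ S := (last_mem_sList_iff root mode).mpr h127
        obtain ⟨hcnt127, hgetlast⟩ := last_facts hmem
        rw [hcnt127]
        rcases Nat.eq_zero_or_pos k' with hk0 | hk0
        · subst hk0
          rw [if_pos rfl, if_pos (show (0:Int) ≤ (L : Int) + step by omega)]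
          rw [pyGet_getD S _ (by omega)]
          rw [show ((L : Int) + step).toNat = L - 1 by omega]
          exact hgetlast.symm
        · rw [if_neg (by omega)]
          by_cases hge : k' ≤ L - 1
          · rw [if_pos hge, if_pos (show (0:Int) ≤ (L : Int) + step by omega)]
            rw [pyGet_getD S _ (by omega)]
            rw [show ((L : Int) + step).toNat = L - 1 - k' by omega]
          · rw [if_neg hge, if_neg (show ¬((0:Int) ≤ (L : Int) + step) by omega)]
      · -- 127 is not a scale tone: ¬D forces saturation in both
        have hnotmem : (127 : Int) ∉ S := fun hh => by
          rw [last_mem_sList_iff root mode] at hh; simp [hh] at h127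
        have hcnt127 : S.countP (fun n => decide (n < 127)) = L := by
          rw [count_lt_eq_le_of_not_mem hnotmem]
          exact count_le_all root mode (le_refl 127)
        rw [hcnt127]
        have hLd : (dLen root mode : Int) = (L : Int) := by
          rw [dLen_eq]
        have hbig : (L : Int) + 1 ≤ -step ∧
            (-step = (L : Int) + 1 → dHasPC root 0 mode = true) := by
          by_contra hcon
          push_neg at hcon
          apply hnD
          rw [D_eq]
          right
          refine ⟨hstep, h128, by simp [h127], ?_⟩
          rw [hLd]
          by_cases hle : -step ≤ (L : Int)
          · exact Or.inl hle
          · have h1 : (L : Int) + 1 ≤ -step := by omega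
            obtain ⟨h2, h3⟩ := hcon h1
            exact Or.inr ⟨h2, by simpa using h3⟩
        rcases hbig with ⟨hge, himp⟩
        by_cases heq : -step = (L : Int) + 1
        · -- k = L + 1 and 0 is a scale tone: A lands on scale[0] = 0, B saturates at 0
          have h0 : dHasPC root 0 mode = true := himp heq
          have hmem0 : (0 : Int) ∈ S := (zero_mem_sList_iff root mode).mpr h0
          obtain ⟨_, hget0⟩ := zero_facts hmem0
          rw [if_neg (show ¬ k' = 0 by omega), if_pos (show k' ≤ L by omega)]
          rw [show L - k' = 0 by omega, hget0]
          rw [if_neg (show ¬((0:Int) ≤ (L : Int) + step) by omega)]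
        · -- k ≥ L + 2: both saturate at 0
          rw [if_neg (show ¬ k' = 0 by omega), if_neg (show ¬ k' ≤ L by omega),
            if_neg (show ¬((0:Int) ≤ (L : Int) + step) by omega)]
    · -- note ≤ 128: direct closed forms
      rw [outer_down root mode step.natAbs note (by omega)]
      rw [show (sList root mode).countP (fun n => decide (n < note)) + step =
          ((sList root mode).countP (fun n => decide (n < note)) : Int) -
            ((step.natAbs : Nat) : Int) by omega]
      exact down_tail (sList root mode) _ step.natAbs note hk1
  · -- step = 0
    subst hstep
    rw [if_pos rfl]
    simp [outerA]
  · -- step > 0 : upward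
    rw [if_pos (show (0 : Int) ≤ step by omega),
      if_neg (show ¬ step = 0 by omega), if_pos hstep]
    have hk1 : 1 ≤ step.natAbs := by omega
    have hks : step = ((step.natAbs : Nat) : Int) := by omega
    by_cases hneg : note < -1
    · -- out-of-range start: first A-iteration clamps to 0
      have hLpos := sList_ne_nil root mode
      obtain ⟨k', hk'⟩ : ∃ k', step.natAbs = k' + 1 := ⟨step.natAbs - 1, by omega⟩
      rw [hk', A_up_low root mode note k' hneg]
      have hcntnote : (sList root mode).countP (fun n => decide (n ≤ note)) = 0 :=
        count_le_none root mode (by omega)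
      rw [hcntnote]
      simp only [Nat.cast_zero]
      set S := sList root mode with hS
      set L := S.length with hL
      by_cases h0 : dHasPC root 0 mode = true
      · -- 0 is a scale tone: it is the bottom element, both agree
        have hmem : (0 : Int) ∈ S := (zero_mem_sList_iff root mode).mpr h0
        obtain ⟨hcnt0, hget0⟩ := zero_facts hmem
        rw [hcnt0]
        rcases Nat.eq_zero_or_pos k' with hk0 | hk0
        · subst hk0
          rw [if_pos rfl, if_pos (show (0:Int) + step - 1 < (L : Int) by omega)]
          rw [pyGet_getD S _ (by omega)]
          rw [show ((0:Int) + step - 1).toNat = 0 by omega]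
          exact hget0.symm
        · rw [if_neg (by omega)]
          by_cases hge : 1 + k' ≤ L
          · rw [if_pos hge, if_pos (show (0:Int) + step - 1 < (L : Int) by omega)]
            rw [pyGet_getD S _ (by omega)]
            rw [show ((0 : Int) + step - 1).toNat = 1 + k' - 1 by omega]
          · rw [if_neg hge, if_neg (show ¬((0:Int) + step - 1 < (L : Int)) by omega)]
      · -- 0 is not a scale tone: ¬D forces saturation in both
        have hnotmem : (0 : Int) ∉ S := fun hh => by
          rw [zero_mem_sList_iff root mode] at hh; simp [hh] at h0
        have hcnt0 : S.countP (fun n => decide (n ≤ 0)) = 0 := by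
          rw [← count_lt_eq_le_of_not_mem hnotmem]
          exact count_lt_none root mode (le_refl 0)
        rw [hcnt0]
        have hLd : (dLen root mode : Int) = (L : Int) := by
          rw [dLen_eq]
        have hbig : (L : Int) + 1 ≤ step ∧
            (step = (L : Int) + 1 → dHasPC root 127 mode = true) := by
          by_contra hcon
          push_neg at hcon
          apply hnD
          rw [D_eq]
          left
          refine ⟨hstep, hneg, by simp [h0], ?_⟩
          rw [hLd]
          by_cases hle : step ≤ (L : Int)
          · exact Or.inl hle
          · have h1 : (L : Int) + 1 ≤ step := by omega
            obtain ⟨h2, h3⟩ := hcon h1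
            exact Or.inr ⟨h2, by simpa using h3⟩
        rcases hbig with ⟨hge, himp⟩
        by_cases heq : step = (L : Int) + 1
        · -- k = L + 1 and 127 is a scale tone: A lands on scale[L-1] = 127, B saturates
          have h127 : dHasPC root 127 mode = true := himp heq
          have hmem127 : (127 : Int) ∈ S := (last_mem_sList_iff root mode).mpr h127
          obtain ⟨_, hgetlast⟩ := last_facts hmem127
          rw [if_neg (show ¬ k' = 0 by omega), if_pos (show 0 + k' ≤ L by omega)]
          rw [show 0 + k' - 1 = L - 1 by omega, hgetlast]
          rw [if_neg (show ¬((0:Int) + step - 1 < (L : Int)) by omega)]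
        · -- k ≥ L + 2: both saturate at 127
          rw [if_neg (show ¬ k' = 0 by omega), if_neg (show ¬ 0 + k' ≤ L by omega),
            if_neg (show ¬((0:Int) + step - 1 < (L : Int)) by omega)]
    · -- note ≥ -1: direct closed forms
      rw [outer_up root mode step.natAbs note (by omega)]
      rw [show ((sList root mode).countP (fun n => decide (n ≤ note)) : Int) + step - 1 =
          ((sList root mode).countP (fun n => decide (n ≤ note)) : Int) +
            ((step.natAbs : Nat) : Int) - 1 by omega]
      exact up_tail (sList root mode) _ step.natAbs note hk1

theorem scale_step_py_changed : Claim_changed_scale_step_py := by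
  unfold Claim_changed_scale_step_py; decide

theorem scale_step_py_tight : Claim_exact_scale_step_py := by
  unfold Claim_exact_scale_step_py
  intro note step root mode _ hD
  rw [alt_eq]
  simp only []
  unfold scale_step_py
  have hLpos := sList_ne_nil root mode
  rw [D_eq] at hD
  rcases hD with ⟨hstep, hneg, h0, hrange⟩ | ⟨hstep, h128, h127, hrange⟩
  · -- upward from below the range, 0 not a scale tone
    rw [if_pos (show (0 : Int) ≤ step by omega),
      if_neg (show ¬ step = 0 by omega), if_pos hstep]
    obtain ⟨k', hk'⟩ : ∃ k', step.natAbs = k' + 1 := ⟨step.natAbs - 1, by omega⟩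
    rw [hk', A_up_low root mode note k' hneg]
    have hcntnote : (sList root mode).countP (fun n => decide (n ≤ note)) = 0 :=
      count_le_none root mode (by omega)
    rw [hcntnote]
    simp only [Nat.cast_zero]
    have hnotmem : (0 : Int) ∉ sList root mode := fun hh => by
      rw [zero_mem_sList_iff root mode] at hh; simp [hh] at h0
    have hcnt0 : (sList root mode).countP (fun n => decide (n ≤ 0)) = 0 := by
      rw [← count_lt_eq_le_of_not_mem hnotmem]
      exact count_lt_none root mode (le_refl 0)
    rw [hcnt0]
    set S := sList root mode with hS
    set L := S.length with hL
    rw [dLen_eq root mode, ← hS, ← hL] at hrange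
    have hSL : (sList root mode).length = L := by rw [← hS]
    rcases Nat.eq_zero_or_pos k' with hk0 | hk0
    · -- one step: A returns 0, B returns the first scale tone, which is not 0
      subst hk0
      rw [if_pos rfl, if_pos (show (0:Int) + step - 1 < (L : Int) by omega)]
      rw [pyGet_getD S _ (by omega), show ((0 : Int) + step - 1).toNat = 0 by omega]
      intro hcon
      exact hnotmem (hcon ▸ getD_mem_sList (by omega))
    · rw [if_neg (by omega)]
      by_cases hin : 0 + k' ≤ L
      · rw [if_pos hin]
        by_cases hsat : (0:Int) + step - 1 < (L : Int)
        · -- consecutive scale positions k'-1 < k'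
          rw [if_pos hsat, pyGet_getD S _ (by omega),
            show ((0 : Int) + step - 1).toNat = k' by omega]
          exact ne_of_lt (getD_strict (pairwise_sList root mode) (by omega) (by omega))
        · -- A at the top scale tone, B saturated at 127 ∉ S
          rw [if_neg hsat]
          have hkL : k' = L := by omega
          have heq : step = (L : Int) + 1 := by omega
          have h127f : dHasPC root 127 mode = false := by
            rcases hrange with hle | ⟨_, hf⟩
            · omega
            · exact hf
          intro hcon
          have : (127 : Int) ∈ S := by
            rw [← hcon, hkL]
            exact getD_mem_sList (by omega)
          rw [last_mem_sList_iff root mode] at this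
          simp [this] at h127f
      · omega
  · -- downward from above the range, 127 not a scale tone
    rw [if_neg (show ¬ (0 : Int) ≤ step by omega),
      if_neg (show ¬ step = 0 by omega), if_neg (show ¬ (0 : Int) < step by omega)]
    obtain ⟨k', hk'⟩ : ∃ k', step.natAbs = k' + 1 := ⟨step.natAbs - 1, by omega⟩
    rw [hk', A_down_high root mode note k' h128]
    have hcntnote : (sList root mode).countP (fun n => decide (n < note)) =
        (sList root mode).length := count_lt_all root mode (by omega)
    rw [hcntnote]
    have hnotmem : (127 : Int) ∉ sList root mode := fun hh => by
      rw [last_mem_sList_iff root mode] at hh; simp [hh] at h127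
    have hcnt127 : (sList root mode).countP (fun n => decide (n < 127)) =
        (sList root mode).length := by
      rw [count_lt_eq_le_of_not_mem hnotmem]
      exact count_le_all root mode (le_refl 127)
    rw [hcnt127]
    set S := sList root mode with hS
    set L := S.length with hL
    rw [dLen_eq root mode, ← hS, ← hL] at hrange
    have hSL : (sList root mode).length = L := by rw [← hS]
    rcases Nat.eq_zero_or_pos k' with hk0 | hk0
    · -- one step: A returns 127 ∉ S, B returns the top scale tone
      subst hk0
      rw [if_pos rfl, if_pos (show (0:Int) ≤ (L : Int) + step by omega)]
      rw [pyGet_getD S _ (by omega), show ((L : Int) + step).toNat = L - 1 by omega]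
      intro hcon
      exact hnotmem (hcon ▸ getD_mem_sList (by omega))
    · rw [if_neg (by omega)]
      by_cases hin : k' ≤ L
      · rw [if_pos hin]
        by_cases hsat : (0:Int) ≤ (L : Int) + step
        · -- consecutive scale positions L-k'-1 < L-k'
          rw [if_pos hsat, pyGet_getD S _ (by omega),
            show ((L : Int) + step).toNat = L - k' - 1 by omega]
          exact (ne_of_lt (getD_strict (pairwise_sList root mode)
            (show L - k' - 1 < L - k' by omega) (by omega))).symm
        · -- A at the bottom scale tone, B saturated at 0 ∉ S
          rw [if_neg hsat]
          have hkL : k' = L := by omega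
          have heq : -step = (L : Int) + 1 := by omega
          have h0f : dHasPC root 0 mode = false := by
            rcases hrange with hle | ⟨_, hf⟩
            · omega
            · exact hf
          intro hcon
          have : (0 : Int) ∈ S := by
            rw [← hcon, hkL]
            exact getD_mem_sList (by omega)
          rw [zero_mem_sList_iff root mode] at this
          simp [this] at h0f
      · omega
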